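-- pv_equiv track=rewrite | github.com/MrBrantCode/unitest_baseline | mut_generate/mist_train_cf/cf_3449/solution.py | count_prime_pairs
-- ===== SOURCE A (Python) =====
-- def is_prime(n):
--     """Check if a number is prime."""
--     if n < 2:
--         return False
--     for i in range(2, int(n**0.5) + 1):
--         if n % i == 0:
--             return False
--     return True
--
-- def count_prime_pairs(nums):
--     """
--     Count the pairs in the array whose absolute difference is a prime number.
--
--     Args:
--         nums (list): A list of positive integers.
--
--     Returns:
--         int: The count of pairs whose absolute difference is a prime number.
--     """
--     count = 0
--     for i in range(len(nums)):
--         for j in range(i + 1, len(nums)):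
--             diff = abs(nums[i] - nums[j])
--             if is_prime(diff):
--                 count += 1
--     return count
-- ===== SOURCE B (Python) =====
-- def _is_prime_alt(n):
--     """Primality by parity test plus odd trial divisors, no sqrt needed."""
--     if n < 2:
--         return False
--     if n % 2 == 0:
--         return n == 2
--     d = 3
--     while d * d <= n:
--         if n % d == 0:
--             return False
--         d += 2
--     return True
--
-- def count_prime_pairs(nums):
--     # Histogram the values once, then count pairs over DISTINCT values,
--     # weighting each pair of distinct values by the product of their counts
--     # (equal values have difference 0, which is not prime).
--     counts = {}
--     for x in nums:
--         counts[x] = counts.get(x, 0) + 1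
--     pending = list(counts.items())
--     total = 0
--     while pending:
--         u, cu = pending.pop(0)
--         for v, cv in pending:
--             if _is_prime_alt(abs(u - v)):
--                 total += cu * cv
--     return total
-- ===== Notes on version B (the rewrite author's own statement) =====
-- stated objective: alternative
-- what changed: B builds a value histogram once and counts pairs over distinct values weighted by the product of their counts (plus a parity-then-odd-divisors primality test), instead of A's scan over all index pairs with full trial division per pair.
import Mathlib
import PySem

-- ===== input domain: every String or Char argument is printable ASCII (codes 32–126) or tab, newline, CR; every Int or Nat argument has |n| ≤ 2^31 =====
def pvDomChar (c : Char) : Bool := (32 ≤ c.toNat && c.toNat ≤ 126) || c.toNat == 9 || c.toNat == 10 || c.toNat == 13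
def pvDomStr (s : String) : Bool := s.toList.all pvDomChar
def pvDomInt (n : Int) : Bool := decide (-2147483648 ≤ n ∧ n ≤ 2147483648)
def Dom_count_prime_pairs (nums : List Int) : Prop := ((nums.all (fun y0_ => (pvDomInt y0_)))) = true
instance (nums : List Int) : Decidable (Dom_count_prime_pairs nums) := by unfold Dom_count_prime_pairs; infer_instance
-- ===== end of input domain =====

-- B replaces A's scan over all index pairs by a value histogram: pairs of DISTINCT
-- values weighted by count products, with an odd-divisors-only primality test.

-- ===== PORT A =====
-- 'int(n**0.5)' is ported as Nat.sqrt: exact for 0 ≤ n ≤ 2^32, which covers every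
-- |difference| of two Dom integers (|x| ≤ 2^31); checked against CPython on that range.
-- 'for i in range(2, int(n**0.5)+1): if n % i == 0: return False' — the lazy range is
-- traversed with early return, as in Python; the fuel counts the remaining iterations
def isPrimeLoop (n i : Int) : Nat → Bool
  | 0 => true
  | fuel + 1 => if PySem.Int.mod n i == 0 then false else isPrimeLoop n (i + 1) fuel

def is_prime (n : Int) : Bool :=
  if n < 2 then false
  else isPrimeLoop n 2 ((((Nat.sqrt n.toNat : Int) + 1) - 2).toNat)

def count_prime_pairs (nums : List Int) : Int :=
  (PySem.List.pyRange 0 (PySem.List.len nums) 1).foldl (fun count i =>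
    (PySem.List.pyRange (i + 1) (PySem.List.len nums) 1).foldl (fun count j =>
      if is_prime |PySem.List.pyGetD nums i 0 - PySem.List.pyGetD nums j 0|
      then count + 1 else count) count) 0

-- ===== PORT B =====
-- 'while d * d <= n: if n % d == 0: return False; d += 2' then 'return True'
def altPrimeLoop (n : Int) (d : Nat) : Bool :=
  if h : (d : Int) * (d : Int) ≤ n then
    (if PySem.Int.mod n (d : Int) == 0 then false else altPrimeLoop n (d + 2))
  else true
termination_by (n + 1 - (d : Int) * (d : Int)).toNat
decreasing_by
  have hexp : ((d + 2 : Nat) : Int) * ((d + 2 : Nat) : Int)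
      = (d : Int) * (d : Int) + 4 * (d : Int) + 4 := by push_cast; ring
  rw [hexp]
  generalize hx : (d : Int) * (d : Int) = x at h ⊢
  omega

def altIsPrime (n : Int) : Bool :=
  if n < 2 then false
  else if PySem.Int.mod n 2 == 0 then n == 2
  else altPrimeLoop n 3

-- 'while pending: u, cu = pending.pop(0); for v, cv in pending: …'
def altPairLoop : List (Int × Int) → Int → Int
  | [], total => total
  | (u, cu) :: pending, total =>
      altPairLoop pending
        (pending.foldl (fun t p => if altIsPrime |u - p.1| then t + cu * p.2 else t) total)

def count_prime_pairs_alt (nums : List Int) : Int :=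
  let counts := nums.foldl (fun d x => d.insert x (d.getD x 0 + 1)) PySem.Dict.empty
  altPairLoop counts.items 0

-- ===== PRECONDITION & SPEC =====
def Spec_count_prime_pairs (nums : List Int) (out : Int) : Prop := out = count_prime_pairs_alt nums
instance (nums : List Int) (out : Int) : Decidable (Spec_count_prime_pairs nums out) := by unfold Spec_count_prime_pairs; infer_instance

-- ===== CLAIM (what is proved, stated in full; the proofs are below) =====
def Claim_equal_count_prime_pairs : Prop := ∀ (nums : List Int), Dom_count_prime_pairs nums → Spec_count_prime_pairs nums (count_prime_pairs nums)

-- ===== LEMMAS AND PROOFS =====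

-- the 0/1 pair weight both programs sum
def pw (x y : Int) : Int := if is_prime |x - y| then 1 else 0

theorem pw_comm (x y : Int) : pw x y = pw y x := by
  unfold pw; rw [abs_sub_comm]

theorem pw_self (x : Int) : pw x x = 0 := by
  simp [pw, is_prime]

-- canonical structural form of A's double loop
def pairSum : List Int → Int
  | [] => 0
  | x :: t => (t.map (fun y => pw x y)).sum + pairSum t

-- canonical structural form of B's loop over the histogram items
def hsum : List (Int × Int) → Int
  | [] => 0
  | (u, cu) :: rest => (rest.map (fun p => cu * p.2 * pw u p.1)).sum + hsum rest

-- B's odd-divisors primality test agrees with A's full trial division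
theorem isPrimeLoop_fuel (n : Int) : ∀ (fuel : Nat) (i : Int),
    isPrimeLoop n i fuel
      = !((PySem.List.pyRange i (i + (fuel : Int)) 1).any fun j => PySem.Int.mod n j == 0) := by
  intro fuel
  induction fuel with
  | zero =>
    intro i
    have hr : PySem.List.pyRange i (i + ((0:Nat):Int)) 1 = [] := by
      rw [PySem.List.pyRange_of_pos _ _ (by norm_num : (0:Int) < 1), if_neg (by omega)]
      simp
    rw [hr]
    simp [isPrimeLoop]
  | succ fuel ih =>
    intro i
    have hb : i + ((fuel + 1 : Nat) : Int) = (i + 1) + (fuel : Int) := by push_cast; ring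
    rw [hb]
    have hlt : i < (i + 1) + (fuel : Int) := by
      have : (0:Int) ≤ (fuel : Int) := Int.natCast_nonneg fuel
      omega
    rw [PySem.List.pyRange_one_cons hlt, List.any_cons]
    simp only [isPrimeLoop]
    by_cases hmod : PySem.Int.mod n i == 0
    · simp [hmod]
    · rw [Bool.not_eq_true] at hmod
      simp only [hmod, Bool.false_eq_true, if_false, Bool.false_or]
      exact ih (i + 1)

theorem is_prime_eq (n : Int) (h2 : ¬ n < 2) :
    is_prime n
      = !((PySem.List.pyRange 2 ((Nat.sqrt n.toNat : Int) + 1) 1).any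
          fun j => PySem.Int.mod n j == 0) := by
  unfold is_prime
  rw [if_neg h2, isPrimeLoop_fuel n _ 2]
  have hs : 1 ≤ (Nat.sqrt n.toNat : Int) := by
    have : 1 ≤ Nat.sqrt n.toNat := by
      rw [Nat.le_sqrt]; omega
    exact_mod_cast this
  have hb : (2:Int) + (((((Nat.sqrt n.toNat : Int) + 1) - 2).toNat : Nat) : Int)
      = (Nat.sqrt n.toNat : Int) + 1 := by omega
  rw [hb]

theorem altPrimeLoop_spec (n : Int) : ∀ (m : Nat), ∀ (d : Nat), (n + 1 - (d:Int)*(d:Int)).toNat = m →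
    (altPrimeLoop n d = true ↔
      ∀ k : Nat, ((d:Int) + 2*(k:Int)) * ((d:Int) + 2*(k:Int)) ≤ n →
        ¬ PySem.Int.mod n ((d:Int) + 2*(k:Int)) = 0) := by
  intro m
  induction m using Nat.strong_induction_on with
  | _ m ih =>
    intro d hm
    rw [altPrimeLoop]
    by_cases h : (d:Int) * (d:Int) ≤ n
    · rw [dif_pos h]
      by_cases hmod : PySem.Int.mod n (d:Int) == 0
      · rw [if_pos hmod]
        constructor
        · intro hfalse; cases hfalse
        · intro hall
          exfalso
          refine hall 0 ?_ ?_
          · simpa using h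
          · simpa using beq_iff_eq.mp hmod
      · rw [if_neg hmod]
        have hexp : ((d + 2 : Nat) : Int) * ((d + 2 : Nat) : Int)
            = (d:Int)*(d:Int) + 4*(d:Int) + 4 := by push_cast; ring
        have hlt : (n + 1 - ((d + 2 : Nat) : Int) * ((d + 2 : Nat) : Int)).toNat < m := by
          rw [hexp]
          generalize hx : (d : Int) * (d : Int) = x at h hm
          omega
        rw [ih _ hlt (d + 2) rfl]
        constructor
        · intro hall k
          cases k with
          | zero =>
            intro _ hmod0
            simp only [Nat.cast_zero, mul_zero, add_zero] at hmod0
            exact hmod (beq_iff_eq.mpr hmod0)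
          | succ k' =>
            have he : (d:Int) + 2*((k' + 1 : Nat) : Int) = ((d + 2 : Nat) : Int) + 2*(k' : Int) := by
              push_cast; ring
            rw [he]
            exact hall k'
        · intro hall k
          have he : ((d + 2 : Nat) : Int) + 2*(k:Int) = (d:Int) + 2*((k + 1 : Nat) : Int) := by
            push_cast; ring
          rw [he]
          exact hall (k + 1)
    · rw [dif_neg h]
      constructor
      · intro _ k hk
        exfalso
        have h0d : (0:Int) ≤ (d:Int) := Int.natCast_nonneg d
        have h0k : (0:Int) ≤ (k:Int) := Int.natCast_nonneg k
        nlinarith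
      · intro _; rfl

theorem altIsPrime_eq (n : Int) : altIsPrime n = is_prime n := by
  by_cases h2 : n < 2
  · simp [altIsPrime, is_prime, h2]
  · rw [is_prime_eq n h2]
    unfold altIsPrime
    rw [if_neg h2]
    by_cases he : PySem.Int.mod n 2 == 0
    · rw [if_pos he]
      by_cases h2' : n = 2
      · subst h2'
        have hs2 : Nat.sqrt (Int.toNat 2) ≤ 1 := by
          have h := Nat.sqrt_lt_self (n := Int.toNat 2) (by decide)
          omega
        have hs2' : ((Nat.sqrt (Int.toNat 2) : Nat) : Int) ≤ 1 := by exact_mod_cast hs2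
        have hr : PySem.List.pyRange 2 ((Nat.sqrt (Int.toNat 2) : Int) + 1) 1 = [] := by
          rw [PySem.List.pyRange_of_pos _ _ (by norm_num : (0:Int) < 1),
            if_neg (by omega : ¬ (2 : Int) < (Nat.sqrt (Int.toNat 2) : Int) + 1)]
          simp
        rw [hr]
        simp
      · have hdvd : (2:Int) ∣ n := by
          rw [← PySem.Int.mod_eq_zero_iff_dvd]; exact beq_iff_eq.mp he
        have hn4 : 4 ≤ n := by omega
        have hs : 2 ≤ (Nat.sqrt n.toNat : Int) := by
          have : 2 ≤ Nat.sqrt n.toNat := by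
            rw [Nat.le_sqrt]; omega
          exact_mod_cast this
        have hany : (PySem.List.pyRange 2 ((Nat.sqrt n.toNat : Int) + 1)).any
            (fun i => PySem.Int.mod n i == 0) = true := by
          rw [List.any_eq_true]
          exact ⟨2, PySem.List.mem_pyRange_one.mpr (by omega), he⟩
        simp [hany, h2']
    · rw [if_neg he]
      have hodd : ¬ (2:Int) ∣ n := by
        rw [← PySem.Int.mod_eq_zero_iff_dvd]
        intro h; exact he (beq_iff_eq.mpr h)
      have hn0 : 0 ≤ n := by omega
      have hnn : ((n.toNat : Nat) : Int) = n := Int.toNat_of_nonneg hn0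
      have hs1 : (Nat.sqrt n.toNat : Int) * (Nat.sqrt n.toNat : Int) ≤ n := by
        have h := Nat.sqrt_le n.toNat
        have h' := (Nat.cast_le (α := Int)).mpr h
        push_cast at h'
        rw [hnn] at h'
        exact h'
      have hs2 : n < ((Nat.sqrt n.toNat : Int) + 1) * ((Nat.sqrt n.toNat : Int) + 1) := by
        have h := Nat.lt_succ_sqrt n.toNat
        have h' := (Nat.cast_lt (α := Int)).mpr h
        push_cast at h'
        rw [hnn] at h'
        exact h'
      rw [Bool.eq_iff_iff, altPrimeLoop_spec n _ 3 rfl]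
      simp only [Bool.not_eq_true', List.any_eq_false, beq_iff_eq, Nat.cast_ofNat]
      constructor
      · intro hall i hi hmod
        have hi' := PySem.List.mem_pyRange_one.mp hi
        have hdvd : i ∣ n := (PySem.Int.mod_eq_zero_iff_dvd n i).mp hmod
        have hi2 : ¬ (2:Int) ∣ i := fun h2i => hodd (h2i.trans hdvd)
        have h23 : (2:Int) ∣ i - 3 := by omega
        obtain ⟨c, hc⟩ := h23
        have hc0 : (0:Int) ≤ c := by omega
        have hck : ((c.toNat : Nat) : Int) = c := Int.toNat_of_nonneg hc0
        have hk2 : ((3:Int) + 2*((c.toNat : Nat) : Int)) = i := by rw [hck]; omega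
        have hile : i ≤ (Nat.sqrt n.toNat : Int) := by omega
        have h0i : (0:Int) ≤ i := by omega
        have hsq : i * i ≤ n := by nlinarith
        exact hall c.toNat (by rw [hk2]; exact hsq) (by rw [hk2]; exact hmod)
      · intro h k hk hmod
        have h0k : (0:Int) ≤ (k:Int) := Int.natCast_nonneg k
        have h0s : (0:Int) ≤ (Nat.sqrt n.toNat : Int) := Int.natCast_nonneg _
        have hlt : (3:Int) + 2*(k:Int) < (Nat.sqrt n.toNat : Int) + 1 := by nlinarith
        exact h ((3:Int) + 2*(k:Int))
          (PySem.List.mem_pyRange_one.mpr (by omega)) hmod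

-- ===== A-side: the double index loop computes pairSum =====
theorem outerA (nums : List Int) : ∀ (d k : Nat), nums.length - k = d → ∀ c : Int,
    (PySem.List.pyRange (k : Int) (PySem.List.len nums) 1).foldl (fun count i =>
      (PySem.List.pyRange (i + 1) (PySem.List.len nums) 1).foldl (fun count j =>
        if is_prime |PySem.List.pyGetD nums i 0 - PySem.List.pyGetD nums j 0|
        then count + 1 else count) count) c
      = c + pairSum (nums.drop k) := by
  intro d
  induction d with
  | zero =>
    intro k hk c
    have hk' : nums.length ≤ k := by omega
    have hnl : ¬ ((k : Int) < PySem.List.len nums) := by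
      simp only [PySem.List.len_eq]
      exact_mod_cast not_lt.mpr hk'
    have hrange : PySem.List.pyRange (k : Int) (PySem.List.len nums) 1 = [] := by
      rw [PySem.List.pyRange_of_pos _ _ (by norm_num : (0:Int) < 1), if_neg hnl]
      simp
    have hd : nums.drop k = [] := List.drop_eq_nil_of_le hk'
    rw [hrange, List.foldl_nil, hd]
    simp [pairSum]
  | succ m ih =>
    intro k hk c
    have hklt : k < nums.length := by omega
    have hlt : (k : Int) < PySem.List.len nums := by
      simp only [PySem.List.len_eq]
      exact_mod_cast hklt
    rw [PySem.List.pyRange_one_cons hlt, List.foldl_cons]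
    have hcast : ((k : Int) + 1) = (((k + 1 : Nat)) : Int) := by push_cast; ring
    rw [hcast]
    rw [PySem.List.foldl_pyRange_pyGetD nums 0
      (fun acc y => if is_prime |PySem.List.pyGetD nums (k : Int) 0 - y| then acc + 1 else acc)
      c (a := ((k + 1 : Nat) : Int)) (by positivity)]
    rw [Int.toNat_natCast]
    rw [PySem.List.foldl_if_add_one
      (fun y => is_prime |PySem.List.pyGetD nums (k : Int) 0 - y|) (nums.drop (k + 1)) c]
    rw [ih (k + 1) (by omega)]
    have hget : PySem.List.pyGetD nums (k : Int) 0 = nums[k] := by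
      rw [PySem.List.pyGetD_eq_getElem nums 0 (by positivity) (by exact_mod_cast hklt)]
      simp
    simp only [hget]
    rw [List.drop_eq_getElem_cons hklt]
    show _ = c + ((((nums.drop (k+1)).map fun y => pw nums[k] y)).sum + pairSum (nums.drop (k+1)))
    simp only [pw]
    rw [PySem.List.sum_map_ite_one_zero]
    ring

theorem portA_eq_pairSum (nums : List Int) : count_prime_pairs nums = pairSum nums := by
  unfold count_prime_pairs
  have h := outerA nums nums.length 0 (by omega) 0
  simpa using h

-- ===== B-side: the histogram loop computes pairSum =====
theorem altPairLoop_eq (l : List (Int × Int)) : ∀ total, altPairLoop l total = total + hsum l := by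
  induction l with
  | nil => intro t; simp [altPairLoop, hsum]
  | cons p rest ih =>
    obtain ⟨u, cu⟩ := p
    intro t
    simp only [altPairLoop]
    rw [ih]
    have hfold : rest.foldl (fun t p => if altIsPrime |u - p.1| then t + cu * p.2 else t) t
        = t + (rest.map (fun p => cu * p.2 * pw u p.1)).sum := by
      have hcong : ∀ (acc : Int) (p : Int × Int), p ∈ rest →
          (if altIsPrime |u - p.1| then acc + cu * p.2 else acc) = acc + cu * p.2 * pw u p.1 := by
        intro acc p _
        rw [altIsPrime_eq]; unfold pw; split <;> ring
      rw [PySem.List.foldl_congr_mem (h := hcong),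
        PySem.List.foldl_add rest (fun p => cu * p.2 * pw u p.1) t]
    rw [hfold]
    simp only [hsum]
    ring

theorem hsum_append (l : List (Int × Int)) (z c : Int) :
    hsum (l ++ [(z, c)]) = hsum l + (l.map (fun p => p.2 * c * pw p.1 z)).sum := by
  induction l with
  | nil => simp [hsum]
  | cons p rest ih =>
    obtain ⟨u, cu⟩ := p
    simp only [List.cons_append, hsum, List.map_append, List.sum_append, List.map_cons,
      List.sum_cons, List.map_nil, List.sum_nil]
    rw [ih]
    ring

theorem sum_ite_not_mem (T : List Int) (z : Int) (h : Int → Int) (hz : z ∉ T) :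
    (T.map (fun k => if k = z then h k else 0)).sum = 0 := by
  induction T with
  | nil => simp
  | cons a t ih =>
    simp only [List.mem_cons, not_or] at hz
    have haz : ¬ a = z := fun h' => hz.1 h'.symm
    simp [haz, ih hz.2]

theorem sum_ite_mem (T : List Int) (z : Int) (h : Int → Int) (hn : T.Nodup) (hz : z ∈ T) :
    (T.map (fun k => if k = z then h k else 0)).sum = h z := by
  induction T with
  | nil => cases hz
  | cons a t ih =>
    rcases List.mem_cons.mp hz with h1 | h1
    · subst h1
      have hzt : z ∉ t := (List.nodup_cons.mp hn).1
      simp [sum_ite_not_mem t z h hzt]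
    · have haz : a ≠ z := by
        rintro rfl; exact (List.nodup_cons.mp hn).1 h1
      simp [haz, ih (List.nodup_cons.mp hn).2 h1]

theorem hsum_bump (S : List Int) (c : Int → Int) (z : Int) (hn : S.Nodup) (hz : z ∈ S) :
    hsum (S.map (fun k => (k, c k + if k = z then 1 else 0))) =
      hsum (S.map (fun k => (k, c k))) + (S.map (fun k => c k * pw k z)).sum := by
  induction S with
  | nil => cases hz
  | cons a T ih =>
    have hna : a ∉ T := (List.nodup_cons.mp hn).1
    have hnT : T.Nodup := (List.nodup_cons.mp hn).2
    have hcomp : (T.map ((fun p : Int × Int => c a * p.2 * pw a p.1) ∘ fun k => (k, c k))).sum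
        = (T.map (fun k => c a * c k * pw a k)).sum := by
      apply congrArg List.sum
      apply List.map_congr_left
      intro k _
      simp only [Function.comp_apply]
    by_cases haz : a = z
    · subst haz
      have hmapeq : T.map (fun k => (k, c k + if k = a then 1 else 0))
          = T.map (fun k => (k, c k)) := by
        apply List.map_congr_left
        intro k hk
        have : k ≠ a := fun h => hna (h ▸ hk)
        simp [this]
      have hlist : (a :: T).map (fun k => (k, c k + if k = a then 1 else 0))
          = (a, c a + 1) :: T.map (fun k => (k, c k)) := by
        rw [List.map_cons, if_pos rfl, hmapeq]
      rw [hlist, List.map_cons, List.map_cons]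
      simp only [hsum, List.map_map, List.sum_cons]
      have hsplit : (T.map ((fun p : Int × Int => (c a + 1) * p.2 * pw a p.1) ∘ fun k => (k, c k))).sum
          = (T.map (fun k => c a * c k * pw a k)).sum + (T.map (fun k => c k * pw k a)).sum := by
        rw [← PySem.List.sum_map_add_int]
        apply congrArg List.sum
        apply List.map_congr_left
        intro k _
        simp only [Function.comp_apply]
        rw [pw_comm k a]
        ring
      rw [hsplit, hcomp, pw_self]
      ring
    · have hzT : z ∈ T := by
        rcases List.mem_cons.mp hz with h1 | h1
        · exact absurd h1.symm haz
        · exact h1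
      have hlist : (a :: T).map (fun k => (k, c k + if k = z then 1 else 0))
          = (a, c a) :: T.map (fun k => (k, c k + if k = z then 1 else 0)) := by
        rw [List.map_cons, if_neg haz, add_zero]
      rw [hlist, List.map_cons, List.map_cons]
      simp only [hsum, List.map_map, List.sum_cons]
      rw [ih hnT hzT]
      have hsplit : (T.map ((fun p : Int × Int => c a * p.2 * pw a p.1) ∘
            fun k => (k, c k + if k = z then 1 else 0))).sum
          = (T.map (fun k => c a * c k * pw a k)).sum
            + (T.map (fun k => if k = z then c a * pw a k else 0)).sum := by
        rw [← PySem.List.sum_map_add_int]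
        apply congrArg List.sum
        apply List.map_congr_left
        intro k _
        simp only [Function.comp_apply]
        split <;> ring
      rw [hsplit, hcomp, sum_ite_mem T z (fun k => c a * pw a k) hnT hzT, pw_comm a z]
      ring

-- summing over the histogram with multiplicities is summing over the list
theorem count_mult (f : Int → Int) : ∀ xs : List Int,
    ((PySem.Set.ofList xs).map (fun k => (List.count k xs : Int) * f k)).sum = (xs.map f).sum := by
  intro xs
  induction xs using List.reverseRecOn with
  | nil => simp [PySem.Set.ofList]
  | append_singleton t z ih =>
    rw [PySem.Set.ofList_append_singleton]
    have hc : ∀ k : Int, (List.count k (t ++ [z]) : Int)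
        = (List.count k t : Int) + if k = z then 1 else 0 := by
      intro k
      rw [List.count_append]
      by_cases h : k = z
      · simp [h]
      · simp [h, Ne.symm h]
    by_cases hz : z ∈ t
    · rw [PySem.Set.add_of_mem ((PySem.Set.mem_ofList t z).mpr hz)]
      have hsplit : ((PySem.Set.ofList t).map (fun k => (List.count k (t ++ [z]) : Int) * f k)).sum
          = ((PySem.Set.ofList t).map (fun k => (List.count k t : Int) * f k)).sum
            + ((PySem.Set.ofList t).map (fun k => if k = z then f k else 0)).sum := by
        rw [← PySem.List.sum_map_add_int]
        apply congrArg List.sum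
        apply List.map_congr_left
        intro k _
        rw [hc k]
        split <;> ring
      rw [hsplit, ih,
        sum_ite_mem _ z f (PySem.Set.nodup_ofList t) ((PySem.Set.mem_ofList t z).mpr hz)]
      simp
    · rw [PySem.Set.add_of_not_mem (fun h => hz ((PySem.Set.mem_ofList t z).mp h))]
      rw [List.map_append, List.sum_append]
      have h1 : ((PySem.Set.ofList t).map (fun k => (List.count k (t ++ [z]) : Int) * f k)).sum
          = ((PySem.Set.ofList t).map (fun k => (List.count k t : Int) * f k)).sum := by
        apply congrArg List.sum
        apply List.map_congr_left
        intro k hk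
        have : k ≠ z := fun h => hz (h ▸ (PySem.Set.mem_ofList t k).mp hk)
        rw [hc k]; simp [this]
      have h2 : (List.count z (t ++ [z]) : Int) = 1 := by
        rw [hc z, List.count_eq_zero.mpr hz]; simp
      rw [h1, ih]
      simp [List.count_eq_zero.mpr hz]

theorem pairSum_append (t : List Int) (z : Int) :
    pairSum (t ++ [z]) = pairSum t + (t.map (fun y => pw y z)).sum := by
  induction t with
  | nil => simp [pairSum]
  | cons x r ih =>
    simp only [List.cons_append, pairSum, List.map_append, List.sum_append, List.map_cons,
      List.sum_cons, List.map_nil, List.sum_nil]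
    rw [ih]
    ring

theorem hsum_counter (xs : List Int) :
    hsum ((PySem.Set.ofList xs).map (fun k => (k, (List.count k xs : Int)))) = pairSum xs := by
  induction xs using List.reverseRecOn with
  | nil => simp [PySem.Set.ofList, hsum, pairSum]
  | append_singleton t z ih =>
    rw [pairSum_append, PySem.Set.ofList_append_singleton]
    have hc : ∀ k : Int, (List.count k (t ++ [z]) : Int)
        = (List.count k t : Int) + if k = z then 1 else 0 := by
      intro k
      rw [List.count_append]
      by_cases h : k = z
      · simp [h]
      · simp [h, Ne.symm h]
    by_cases hz : z ∈ t
    · rw [PySem.Set.add_of_mem ((PySem.Set.mem_ofList t z).mpr hz)]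
      have hmap : (PySem.Set.ofList t).map (fun k => (k, (List.count k (t ++ [z]) : Int)))
          = (PySem.Set.ofList t).map (fun k => (k, (List.count k t : Int) + if k = z then 1 else 0)) := by
        apply List.map_congr_left
        intro k _
        rw [hc k]
      rw [hmap, hsum_bump (PySem.Set.ofList t) (fun k => (List.count k t : Int)) z
        (PySem.Set.nodup_ofList t) ((PySem.Set.mem_ofList t z).mpr hz)]
      rw [ih, count_mult (fun y => pw y z) t]
    · rw [PySem.Set.add_of_not_mem (fun h => hz ((PySem.Set.mem_ofList t z).mp h))]
      rw [List.map_append]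
      have h2 : (List.count z (t ++ [z]) : Int) = 1 := by
        rw [hc z, List.count_eq_zero.mpr hz]; simp
      simp only [List.map_cons, List.map_nil, h2]
      rw [hsum_append]
      have h1 : (PySem.Set.ofList t).map (fun k => (k, (List.count k (t ++ [z]) : Int)))
          = (PySem.Set.ofList t).map (fun k => (k, (List.count k t : Int))) := by
        apply List.map_congr_left
        intro k hk
        have : k ≠ z := fun h => hz (h ▸ (PySem.Set.mem_ofList t k).mp hk)
        rw [hc k]; simp [this]
      rw [h1, ih]
      have h3 : (((PySem.Set.ofList t).map (fun k => (k, (List.count k t : Int)))).map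
            (fun p => p.2 * 1 * pw p.1 z)).sum
          = ((PySem.Set.ofList t).map (fun k => (List.count k t : Int) * pw k z)).sum := by
        rw [List.map_map]
        apply congrArg List.sum
        apply List.map_congr_left
        intro k _
        simp only [Function.comp_apply]
        ring
      rw [h3, count_mult (fun y => pw y z) t]

theorem portB_eq (nums : List Int) : count_prime_pairs_alt nums = pairSum nums := by
  show altPairLoop (nums.foldl (fun d x => d.insert x (d.getD x 0 + 1)) PySem.Dict.empty).items 0
      = pairSum nums
  rw [PySem.Dict.foldl_insert_getD_add_one_eq_counter, PySem.Dict.items_counter,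
    altPairLoop_eq, hsum_counter]
  ring

-- ===== VERDICT (by name: the statement is the Claim_ definition above) =====
theorem count_prime_pairs_spec : Claim_equal_count_prime_pairs := by
  intro nums _
  unfold Spec_count_prime_pairs
  rw [portA_eq_pairSum, portB_eq]
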